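-- pv_equiv track=rewrite | github.com/Victor-Vivar/Tarea2 | Lista2.py | mid
-- ===== SOURCE A (Python) =====
-- def mid(lista):
--     if len(lista) % 2 == 0:
--         if len(lista) == 2:
--             lista.pop(1)
--             return lista
--         lista.pop(0)
--         lista.pop()
--         return mid(lista)
--     if len(lista) == 1:
--         return lista
--     lista.pop(0)
--     lista.pop(-1)
--
--     return mid(lista)
-- ===== SOURCE B (Python) =====
-- def mid(lista):
--     # Direct O(1) index instead of recursively stripping both ends.
--     # Does not mutate its argument (A empties it down to one element).
--     return [lista[(len(lista) - 1) // 2]]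
-- ===== Notes on version B (the rewrite author's own statement) =====
-- stated objective: faster
-- what changed: Replaces the recursive end-stripping (O(n^2) due to pop(0)) with a single O(1) index lista[(len(lista)-1)//2]; B does not mutate the argument; Pre_ excludes the empty list, on which A raises IndexError.
import Mathlib
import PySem

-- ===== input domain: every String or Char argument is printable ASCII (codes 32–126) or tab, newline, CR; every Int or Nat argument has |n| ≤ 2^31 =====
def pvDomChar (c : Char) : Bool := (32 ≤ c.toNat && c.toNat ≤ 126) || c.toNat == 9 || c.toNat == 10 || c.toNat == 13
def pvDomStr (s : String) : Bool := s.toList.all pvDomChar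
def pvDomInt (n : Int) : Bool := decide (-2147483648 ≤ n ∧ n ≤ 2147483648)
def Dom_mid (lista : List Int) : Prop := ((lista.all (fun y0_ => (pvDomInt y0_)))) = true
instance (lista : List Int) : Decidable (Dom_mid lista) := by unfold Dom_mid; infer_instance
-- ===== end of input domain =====

-- B replaces A's recursive end-stripping with one direct index; equivalence is about
-- the RETURN value only (A mutates its argument in place, B does not).

-- ===== PORT A =====
def mid (lista : List Int) : List Int :=
  if lista.length % 2 == 0 then
    if lista.length == 2 then
      match PySem.List.pop? lista 1 with
      | some (_, rest) => rest
      | none => []          -- unreachable (length = 2)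
    else
      match h1 : PySem.List.pop? lista 0 with
      | none => []          -- IndexError on []; excluded by Pre_
      | some (_, l1) =>
        match h2 : PySem.List.pop? l1 (-1) with
        | none => []        -- unreachable under Pre_
        | some (_, l2) => mid l2
  else
    if lista.length == 1 then lista
    else
      match h1 : PySem.List.pop? lista 0 with
      | none => []
      | some (_, l1) =>
        match h2 : PySem.List.pop? l1 (-1) with
        | none => []
        | some (_, l2) => mid l2
termination_by lista.length
decreasing_by
  · have e1 := PySem.List.length_of_pop?_eq_some _ h1
    have e2 := PySem.List.length_of_pop?_eq_some _ h2
    simp at e1 e2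
    omega
  · have e1 := PySem.List.length_of_pop?_eq_some _ h1
    have e2 := PySem.List.length_of_pop?_eq_some _ h2
    simp at e1 e2
    omega

-- ===== PORT B =====
def mid_alt (lista : List Int) : List Int :=
  match PySem.List.pyGet? lista (PySem.Int.floordiv ((lista.length : Int) - 1) 2) with
  | some v => [v]
  | none => []              -- IndexError on []; excluded by Pre_

-- ===== PRECONDITION & SPEC =====
-- A (and B) raise IndexError on the empty list; that is the only exclusion.
def Pre_mid (lista : List Int) : Prop := lista ≠ []
instance (lista : List Int) : Decidable (Pre_mid lista) := by unfold Pre_mid; infer_instance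
def pvWitness_mid : List Int := [3, 1, 4]

def Spec_mid (lista : List Int) (out : List Int) : Prop := out = mid_alt lista
instance (lista : List Int) (out : List Int) : Decidable (Spec_mid lista out) := by unfold Spec_mid; infer_instance

-- ===== CLAIM (what is proved, stated in full; the proofs are below) =====
def Claim_equal_mid : Prop := ∀ (lista : List Int), Dom_mid lista → Pre_mid lista → Spec_mid lista (mid lista)

-- ===== LEMMAS AND PROOFS =====

theorem mid_alt_eq (lista : List Int) (h : lista ≠ []) :
    mid_alt lista = [lista.getD ((lista.length - 1) / 2) 0] := by
  have hn : 1 ≤ lista.length := List.length_pos_iff.mpr h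
  unfold mid_alt
  rw [PySem.Int.floordiv_eq_ediv_of_pos (by norm_num)]
  have hcast : ((lista.length : Int) - 1) / 2 = (((lista.length - 1) / 2 : Nat) : Int) := by
    omega
  have hlt : (lista.length - 1) / 2 < lista.length := by omega
  rw [hcast, PySem.List.pyGet?_natCast, List.getElem?_eq_getElem hlt,
      List.getD_eq_getElem _ _ hlt]

-- one unfolding step of A's recursion for length ≥ 3 (both parity branches strip both ends)
theorem mid_step (a : Int) (l1 : List Int) (h : 3 ≤ (a :: l1).length) :
    mid (a :: l1) = mid l1.dropLast := by
  have hne : l1 ≠ [] := by intro e; subst e; simp at h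
  conv_lhs => rw [mid.eq_def]
  have hpop0 : PySem.List.pop? (a :: l1) 0 = some (a, l1) := PySem.List.pop?_zero_cons a l1
  have hpop1 : PySem.List.pop? l1 (-1) = some (l1.getLast hne, l1.dropLast) := by
    conv_lhs => rw [← List.dropLast_append_getLast hne]
    exact PySem.List.pop?_last _ _
  have hlen2 : ((a :: l1).length == 2) = false := by simp at h ⊢; omega
  have hlen1 : ((a :: l1).length == 1) = false := by simp at h ⊢; omega
  simp only [hlen1, hlen2, Bool.false_eq_true, if_false]
  split <;>
  · split
    · next heq => simp [hpop0] at heq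
    · next heq =>
        rw [hpop0] at heq; cases heq
        split
        · next heq2 => simp [hpop1] at heq2
        · next heq2 => rw [hpop1] at heq2; cases heq2; rfl

theorem mid_eq (n : Nat) : ∀ (lista : List Int), lista.length = n → lista ≠ [] →
    mid lista = [lista.getD ((lista.length - 1) / 2) 0] := by
  induction n using Nat.strong_induction_on with
  | _ n ih =>
  intro lista hlen hne
  match lista, hne with
  | [a], _ => simp [mid]
  | [a, b], _ => simp [mid, PySem.List.pop?, PySem.List.pyIdx?]
  | a :: b :: c :: t, _ =>
    have h3 : 3 ≤ (a :: b :: c :: t).length := by simp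
    rw [mid_step a (b :: c :: t) h3]
    have hdl : (b :: c :: t).dropLast.length = (b :: c :: t).length - 1 :=
      List.length_dropLast
    have hm : (b :: c :: t).dropLast.length < n := by
      rw [hdl]; simp only [List.length_cons] at hlen ⊢; omega
    have hne2 : (b :: c :: t).dropLast ≠ [] := by
      intro e
      have := congrArg List.length e
      simp only [hdl, List.length_cons, List.length_nil] at this
      omega
    rw [ih _ hm _ rfl hne2]
    have hkd : ((b :: c :: t).dropLast.length - 1) / 2 < (b :: c :: t).dropLast.length := by
      simp only [hdl, List.length_cons]; omega
    have hk1 : ((b :: c :: t).dropLast.length - 1) / 2 < (b :: c :: t).length := by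
      simp only [hdl, List.length_cons] at hkd ⊢; omega
    have hidx : ((a :: b :: c :: t).length - 1) / 2 =
        ((b :: c :: t).dropLast.length - 1) / 2 + 1 := by
      simp only [hdl, List.length_cons]; omega
    rw [hidx, List.getD_cons_succ, List.getD_eq_getElem _ _ hkd,
        List.getD_eq_getElem _ _ hk1, List.getElem_dropLast]

-- ===== VERDICT (by name: the statement is the Claim_ definition above) =====
theorem mid_spec : Claim_equal_mid := by
  intro lista _ hpre
  unfold Spec_mid
  rw [mid_eq lista.length lista rfl hpre, mid_alt_eq lista hpre]
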